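-- pv_equiv track=rewrite | github.com/alex-iliarski/Cryptology | ciphers.py | general_substitution_decode
-- ===== SOURCE A (Python) =====
-- def split_string(string, length = 5):
--     """
--     :param string: string to split
--     :param length: length of each split
--     :return: string with spaces every length characters
--     """
--     return ' '.join(string[i:i+length] for i in range(0,len(string),length))
--
-- def general_substitution_decode(str, map):
--     """
--     :param str: string to decode
--     :param map: mapping of letters
--     :return: decoded string
--     """
--     str = str.upper()
--     str = "".join(c for c in str if c.isalpha()) # Remove all non-alphabetic characters from string
--     decoded = ""
--
--     # Create a reverse mapping by swapping keys and values in the map dictionary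
--     reverse_map = {v: k for k, v in map.items()}
--
--     for c in str:
--         if c in reverse_map:
--             decoded += reverse_map[c]
--         else:
--             # If the character is not found in the map, keep it as is
--             decoded += c
--
--     return split_string(decoded)
-- ===== SOURCE B (Python) =====
-- def general_substitution_decode(str, map):
--     # Single fused streaming pass: normalize, substitute and insert the 5-wide
--     # chunk spaces on the fly, instead of staged passes plus a join-of-slices split.
--     rev = {v: k for k, v in map.items()}
--     out = []
--     n = 0
--     for c in str:
--         u = c.upper()
--         if u.isalpha():
--             for d in rev.get(u, u):
--                 if n > 0 and n % 5 == 0: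
--                     out.append(' ')
--                 out.append(d)
--                 n += 1
--     return ''.join(out)
-- ===== Notes on version B (the rewrite author's own statement) =====
-- stated objective: alternative
-- what changed: B fuses A's three staged passes (normalize-and-filter the whole string, per-character translate building an intermediate decoded string, then split_string's join of 5-wide slices) into one streaming loop that uppercases, filters, substitutes and inserts the chunk spaces on the fly with a modular counter, never materialising the intermediate decoded string.
import Mathlib
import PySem

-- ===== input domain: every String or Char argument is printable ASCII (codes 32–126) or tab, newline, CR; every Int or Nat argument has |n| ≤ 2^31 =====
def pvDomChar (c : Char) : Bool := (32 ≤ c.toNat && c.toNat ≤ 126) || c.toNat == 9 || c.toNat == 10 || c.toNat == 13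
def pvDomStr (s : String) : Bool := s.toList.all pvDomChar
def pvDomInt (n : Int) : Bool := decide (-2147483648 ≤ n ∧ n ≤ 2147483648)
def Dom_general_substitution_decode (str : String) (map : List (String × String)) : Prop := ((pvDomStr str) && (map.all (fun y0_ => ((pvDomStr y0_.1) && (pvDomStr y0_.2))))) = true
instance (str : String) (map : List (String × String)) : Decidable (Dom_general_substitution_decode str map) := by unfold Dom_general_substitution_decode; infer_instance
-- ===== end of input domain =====

-- B fuses A's staged passes (normalize+filter, translate into an intermediate decoded string,
-- then split_string's join of 5-wide slices) into ONE streaming loop with a modular counter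
-- that inserts the chunk spaces on the fly (objective: alternative, same cost).

-- ===== PORT A =====
-- the module's split_string (A calls it verbatim)
def pvSplitString (string : List Char) (length : Int) : List Char :=
  PySem.Chars.join [' ']
    ((PySem.List.pyRange 0 (string.length : Int) length).map
      (fun i => PySem.List.slice string (some i) (some (i + length))))

def general_substitution_decode (str : String) (map : List (String × String)) : String :=
  -- the Python parameter `map` is a dict: normalise the association list as dict() does
  let m : PySem.Dict (List Char) (List Char) :=
    PySem.Dict.ofList (map.map (fun kv => (kv.1.toList, kv.2.toList)))
  let s2 : List Char := (PySem.Chars.upper str.toList).filter PySem.Chars.isalpha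
  let reverse_map : PySem.Dict (List Char) (List Char) :=
    m.items.foldl (fun d kv => d.insert kv.2 kv.1) PySem.Dict.empty
  -- `reverse_map[c]` is guarded by `c in reverse_map`, so getD never hits its default
  let decoded : List Char := s2.foldl (fun decoded c =>
    if reverse_map.contains [c] then decoded ++ reverse_map.getD [c] []
    else decoded ++ [c]) []
  String.ofList (pvSplitString decoded 5)

-- ===== PORT B =====
def general_substitution_decode_alt (str : String) (map : List (String × String)) : String :=
  let m : PySem.Dict (List Char) (List Char) :=
    PySem.Dict.ofList (map.map (fun kv => (kv.1.toList, kv.2.toList)))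
  -- rev = {v: k for k, v in map.items()}
  let rev : PySem.Dict (List Char) (List Char) :=
    m.items.foldl (fun d kv => d.insert kv.2 kv.1) PySem.Dict.empty
  -- one streaming pass: out grows in place, n counts decoded characters emitted
  let res : List Char × Int := str.toList.foldl (fun st c =>
    let u : Char := PySem.Chars.upperChar c     -- c.upper() of a 1-char ASCII string
    if PySem.Chars.isalpha u then
      (rev.getD [u] [u]).foldl (fun (st : List Char × Int) d =>
        ((if 0 < st.2 ∧ PySem.Int.mod st.2 5 = 0 then st.1 ++ [' '] else st.1) ++ [d],
          st.2 + 1)) st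
    else st) ([], 0)
  String.ofList res.1

-- ===== PRECONDITION & SPEC =====
def Spec_general_substitution_decode (str : String) (map : List (String × String)) (out : String) : Prop := out = general_substitution_decode_alt str map
instance (str : String) (map : List (String × String)) (out : String) : Decidable (Spec_general_substitution_decode str map out) := by unfold Spec_general_substitution_decode; infer_instance

-- ===== CLAIM =====
def Claim_equal_general_substitution_decode : Prop := ∀ (str : String) (map : List (String × String)), Dom_general_substitution_decode str map → Spec_general_substitution_decode str map (general_substitution_decode str map)

-- ===== LEMMAS AND PROOFS =====

-- B's inner emitting loop, as a function of the state and one piece of decoded text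
def pvEmit (st : List Char × Int) (ds : List Char) : List Char × Int :=
  ds.foldl (fun (st : List Char × Int) d =>
    ((if 0 < st.2 ∧ PySem.Int.mod st.2 5 = 0 then st.1 ++ [' '] else st.1) ++ [d],
      st.2 + 1)) st

-- the decoded stream with a space inserted before every 5th character (counter n)
def pvSpaced (n : Int) : List Char → List Char
  | [] => []
  | d :: ds =>
      (if 0 < n ∧ PySem.Int.mod n 5 = 0 then [' '] else []) ++ d :: pvSpaced (n + 1) ds

-- the 5-wide chunks of a list, recursively
def pvChunks : List Char → List (List Char)
  | [] => []
  | d :: ds => (d :: ds).take 5 :: pvChunks ((d :: ds).drop 5)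
termination_by l => l.length
decreasing_by simp

theorem pvEmit_eq (ds : List Char) (acc : List Char) (n : Int) :
    pvEmit (acc, n) ds = (acc ++ pvSpaced n ds, n + ds.length) := by
  induction ds generalizing acc n with
  | nil => simp [pvEmit, pvSpaced]
  | cons d t ih =>
    simp only [pvEmit, List.foldl_cons, pvSpaced] at *
    rw [ih]
    split_ifs with h <;> simp <;> omega

theorem pvEmit_append (st : List Char × Int) (xs ys : List Char) :
    pvEmit st (xs ++ ys) = pvEmit (pvEmit st xs) ys := by
  simp [pvEmit, List.foldl_append]

theorem pvSpaced_periodic (ds : List Char) (n : Int) (hn : 0 < n) :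
    pvSpaced (n + 5) ds = pvSpaced n ds := by
  induction ds generalizing n with
  | nil => rfl
  | cons d t ih =>
    simp only [pvSpaced]
    have h5 : (0:Int) < 5 := by norm_num
    have hmod : PySem.Int.mod (n + 5) 5 = PySem.Int.mod n 5 := by
      rw [PySem.Int.mod_eq_emod_of_pos h5, PySem.Int.mod_eq_emod_of_pos h5]
      omega
    rw [hmod]
    have ht : pvSpaced (n + 5 + 1) t = pvSpaced (n + 1) t := by
      have := ih (n + 1) (by omega)
      rwa [show n + 1 + 5 = n + 5 + 1 by ring] at this
    rw [ht]
    split_ifs with h h2 h2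
    · rfl
    · exact absurd ⟨by omega, h.2⟩ h2
    · exact absurd ⟨by omega, h2.2⟩ h
    · rfl

theorem pvSpaced_rec (l : List Char) (hl : l ≠ []) :
    pvSpaced 0 l = l.take 5 ++ (if l.drop 5 = [] then [] else ' ' :: pvSpaced 0 (l.drop 5)) := by
  have c0 : ¬(0 < (0:ℤ) ∧ PySem.Int.mod 0 5 = 0) := by decide
  have c1 : ¬(0 < (1:ℤ) ∧ PySem.Int.mod 1 5 = 0) := by decide
  have c2 : ¬(0 < (2:ℤ) ∧ PySem.Int.mod 2 5 = 0) := by decide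
  have c3 : ¬(0 < (3:ℤ) ∧ PySem.Int.mod 3 5 = 0) := by decide
  have c4 : ¬(0 < (4:ℤ) ∧ PySem.Int.mod 4 5 = 0) := by decide
  have c5 : (0 < (5:ℤ) ∧ PySem.Int.mod 5 5 = 0) := by decide
  match l with
  | [] => exact absurd rfl hl
  | [a] => simp [pvSpaced]
  | [a, b] => norm_num [pvSpaced, if_neg c0, if_neg c1]
  | [a, b, c] => norm_num [pvSpaced, if_neg c0, if_neg c1, if_neg c2]
  | [a, b, c, d] => norm_num [pvSpaced, if_neg c0, if_neg c1, if_neg c2, if_neg c3]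
  | [a, b, c, d, e] => norm_num [pvSpaced, if_neg c0, if_neg c1, if_neg c2, if_neg c3, if_neg c4]
  | a :: b :: c :: d :: e :: f :: t =>
    have h6 : pvSpaced (1 + 5) t = pvSpaced 1 t := pvSpaced_periodic t 1 (by norm_num)
    norm_num [pvSpaced, if_neg c0, if_neg c1, if_neg c2, if_neg c3, if_neg c4, if_pos c5] at h6 ⊢
    rw [if_neg (List.cons_ne_nil f t), h6]

theorem pvSpaced_eq_intercalate (ds : List Char) :
    pvSpaced 0 ds = [' '].intercalate (pvChunks ds) := by
  induction hn : ds.length using Nat.strong_induction_on generalizing ds with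
  | _ n ih =>
  match ds with
  | [] => simp [pvSpaced, pvChunks, List.intercalate]
  | d :: t =>
    rw [pvSpaced_rec _ (by simp), pvChunks]
    by_cases hd : (d :: t).drop 5 = []
    · rw [hd, if_pos rfl]
      simp [pvChunks, List.intercalate]
    · rw [if_neg hd]
      have hdl : ((d :: t).drop 5).length < n := by
        subst hn; simp only [List.length_drop, List.length_cons]; omega
      rw [ih _ hdl _ rfl]
      obtain ⟨x, xs, hx⟩ : ∃ x xs, (d :: t).drop 5 = x :: xs := by
        cases h : (d :: t).drop 5 with
        | nil => exact absurd h hd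
        | cons x xs => exact ⟨x, xs, rfl⟩
      rw [hx, pvChunks]
      simp [List.intercalate, List.intersperse]

-- the chunk list produced by split_string's range-of-slices, normalised
theorem pv_chunks_norm (n : Nat) : ∀ (ds : List Char), ds.length ≤ n →
    (List.range ((ds.length + 4) / 5)).map (fun k => (ds.drop (5 * k)).take 5) = pvChunks ds := by
  induction n with
  | zero =>
    intro ds h
    have : ds = [] := List.eq_nil_of_length_eq_zero (by omega)
    subst this; simp [pvChunks]
  | succ n ih =>
    intro ds h
    match ds with
    | [] => simp [pvChunks]
    | d :: t =>
      have hcnt : ((d :: t).length + 4) / 5 = (((d :: t).drop 5).length + 4) / 5 + 1 := by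
        simp only [List.length_cons, List.length_drop]; omega
      rw [hcnt, List.range_succ_eq_map, List.map_cons, List.map_map, pvChunks]
      refine List.cons_eq_cons.mpr ⟨by simp, ?_⟩
      have hfun : ((fun k => ((d :: t).drop (5 * k)).take 5) ∘ Nat.succ)
            = fun k => ((t.drop 4).drop (5 * k)).take 5 := by
          funext k
          rw [Function.comp_apply, show 5 * Nat.succ k = 5 * k + 4 + 1 from by omega,
              List.drop_succ_cons, List.drop_drop, Nat.add_comm 4 (5 * k)]
      rw [hfun, show ((d :: t).drop 5).length + 4 = (t.drop 4).length + 4 from by simp]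
      exact ih (t.drop 4)
        (by simp only [List.length_drop] ; simp only [List.length_cons] at h; omega)

theorem pvSplit_eq_chunks (ds : List Char) :
    pvSplitString ds 5 = [' '].intercalate (pvChunks ds) := by
  unfold pvSplitString
  show [' '].intercalate _ = _
  congr 1
  rw [PySem.List.pyRange_of_pos _ _ (by norm_num : (0:ℤ) < 5)]
  rw [List.map_map]
  rw [← pv_chunks_norm ds.length ds le_rfl]
  by_cases h0 : ds = []
  · subst h0; rfl
  have hpos : 0 < ds.length := List.length_pos_iff.mpr h0
  have hif : (if (0:ℤ) < (ds.length:ℤ) then (((ds.length:ℤ) - 0 + 5 - 1) / 5).toNat else 0)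
      = (ds.length + 4) / 5 := by
    rw [if_pos (by exact_mod_cast hpos)]
    have : ((ds.length:ℤ) - 0 + 5 - 1) = ((ds.length + 4 : Nat) : ℤ) := by push_cast; ring
    rw [this, show (5:ℤ) = ((5:Nat):ℤ) from rfl, ← Int.natCast_div, Int.toNat_natCast]
  rw [hif]
  apply List.map_congr_left
  intro k hk
  simp only [Function.comp_apply]
  have h1 : (0 + 5 * (k:ℤ)) = (((5 * k : Nat) : ℤ)) := by push_cast; ring
  have h2 : (((5 * k : Nat) : ℤ) + 5) = (((5 * k + 5 : Nat) : ℤ)) := by push_cast; ring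
  rw [h1, h2, PySem.List.slice_natCast]
  congr 1
  omega

-- A's translate loop is a flatMap of per-character pieces
theorem pv_decoded_flatMap (rev : PySem.Dict (List Char) (List Char)) (s : List Char) :
    s.foldl (fun acc c => if rev.contains [c] then acc ++ rev.getD [c] []
      else acc ++ [c]) []
    = s.flatMap (fun c => rev.getD [c] [c]) := by
  rw [PySem.List.foldl_congr_mem' (g := fun acc c => acc ++ rev.getD [c] [c])]
  · rw [PySem.List.foldl_append_eq_flatMap]; simp
  · intro c _ acc
    rw [PySem.Dict.contains_eq_isSome_get?, PySem.Dict.getD_eq_get?_getD,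
        PySem.Dict.getD_eq_get?_getD]
    cases hg : rev.get? [c] <;> simp

theorem pv_flatMap_filter {α β : Type} (q : α → Bool) (h : α → List β) (l : List α) :
    l.flatMap (fun c => if q c then h c else []) = (l.filter q).flatMap h := by
  induction l with
  | nil => rfl
  | cons a t ih =>
    by_cases ha : q a <;> simp [ha, ih]

theorem pv_foldl_emit (g : Char → List Char) (l : List Char) (st : List Char × Int) :
    l.foldl (fun st c => pvEmit st (g c)) st = pvEmit st (l.flatMap g) := by
  induction l generalizing st with
  | nil => rfl
  | cons a t ih => rw [List.foldl_cons, List.flatMap_cons, pvEmit_append, ih]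

-- ===== VERDICT =====
theorem general_substitution_decode_spec : Claim_equal_general_substitution_decode := by
  intro str map _
  unfold Spec_general_substitution_decode general_substitution_decode general_substitution_decode_alt
  dsimp only
  congr 1
  -- name the shared reverse dictionary
  set rev : PySem.Dict (List Char) (List Char) :=
    (PySem.Dict.ofList (map.map (fun kv => (kv.1.toList, kv.2.toList)))).items.foldl
      (fun d kv => d.insert kv.2 kv.1) PySem.Dict.empty with hrev
  -- B's outer loop is a fold of pvEmit over the per-character pieces
  have hbody : str.toList.foldl (fun st c =>
        let u : Char := PySem.Chars.upperChar c
        if PySem.Chars.isalpha u then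
          (rev.getD [u] [u]).foldl (fun (st : List Char × Int) d =>
            ((if 0 < st.2 ∧ PySem.Int.mod st.2 5 = 0 then st.1 ++ [' '] else st.1) ++ [d],
              st.2 + 1)) st
        else st) ([], 0)
      = str.toList.foldl (fun st c =>
          pvEmit st (if PySem.Chars.isalpha (PySem.Chars.upperChar c)
            then rev.getD [PySem.Chars.upperChar c] [PySem.Chars.upperChar c] else [])) ([], 0) := by
    apply PySem.List.foldl_congr_mem'
    intro c _ st
    by_cases hc : PySem.Chars.isalpha (PySem.Chars.upperChar c) <;> simp [hc, pvEmit]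
  rw [hbody, pv_foldl_emit]
  rw [pv_flatMap_filter (fun c => PySem.Chars.isalpha (PySem.Chars.upperChar c))
        (fun c => rev.getD [PySem.Chars.upperChar c] [PySem.Chars.upperChar c])]
  -- A's decoded string, in the same normal form
  rw [pv_decoded_flatMap]
  have hs2 : (PySem.Chars.upper str.toList).filter PySem.Chars.isalpha
      = (str.toList.filter (fun c => PySem.Chars.isalpha (PySem.Chars.upperChar c))).map
          PySem.Chars.upperChar := by
    rw [PySem.Chars.upper, List.filter_map]; rfl
  rw [hs2, List.flatMap_map]
  set decoded : List Char :=
    (str.toList.filter (fun c => PySem.Chars.isalpha (PySem.Chars.upperChar c))).flatMap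
      ((fun c => rev.getD [c] [c]) ∘ PySem.Chars.upperChar) with hdec
  have he := pvEmit_eq decoded [] 0
  rw [show ((fun c => rev.getD [PySem.Chars.upperChar c] [PySem.Chars.upperChar c]))
      = ((fun c => rev.getD [c] [c]) ∘ PySem.Chars.upperChar) from rfl]
  rw [← hdec, he]
  simp only [List.nil_append]
  rw [pvSplit_eq_chunks, ← pvSpaced_eq_intercalate]
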